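-- pv_equiv track=rewrite | github.com/Hassan-Dev9496/Python-Practice | DSA/bubbleSort.py | bubble_sorting_alphabets
-- ===== SOURCE A (Python) =====
-- def dubplicate_checker(list_of_name):
--     visited=[]
--     for i in range(len(list_of_name)):
--         if list_of_name[i] not in visited:
--             visited.append(list_of_name[i])
--     return visited
--
-- def bubble_sorting_alphabets(name):
--     list_of_name= list(name)
--     size = len(list_of_name)
--     visited = set()
--     for i in range(size):
--         swapped = False
--         for j in range(0, size-i-1):
--             visited.add(list_of_name[j])
--             if list_of_name[j] > list_of_name[j+1]:
--                 list_of_name[j] , list_of_name[j+1] = list_of_name[j+1] , list_of_name[j]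
--                 swapped = True
--         if not swapped:
--             break
--     return dubplicate_checker(list_of_name)
-- ===== SOURCE B (Python) =====
-- def bubble_sorting_alphabets(name):
--     # dedup first (set), then one sort over the reduced collection
--     return sorted(set(name))
-- ===== Notes on version B (the rewrite author's own statement) =====
-- stated objective: simpler
-- what changed: B collects the distinct characters into a set first and then sorts only that reduced collection (sorted(set(name))), instead of A's bubble-sorting the whole character list and then stripping duplicates with a quadratic membership scan.
import Mathlib
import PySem

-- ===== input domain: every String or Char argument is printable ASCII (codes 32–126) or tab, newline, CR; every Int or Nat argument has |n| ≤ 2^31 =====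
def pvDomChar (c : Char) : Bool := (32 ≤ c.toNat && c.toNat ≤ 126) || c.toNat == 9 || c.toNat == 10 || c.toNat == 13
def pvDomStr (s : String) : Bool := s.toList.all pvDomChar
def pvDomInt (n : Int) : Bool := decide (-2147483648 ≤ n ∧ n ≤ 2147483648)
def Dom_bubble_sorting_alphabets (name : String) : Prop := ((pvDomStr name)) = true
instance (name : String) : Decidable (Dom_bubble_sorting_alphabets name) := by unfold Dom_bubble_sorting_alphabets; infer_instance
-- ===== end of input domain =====

-- B replaces A's bubble-sort-then-dedup by sorted(set(name)); equivalence of the return values is proved.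

-- ===== PORT A =====
-- Python's list(name) is a list of 1-character strings; we represent them as Chars
-- (comparison of single-character Python strings is exactly their Char comparison)
-- and wrap each into a String at the very end. The Python 'visited' set inside
-- bubble_sorting_alphabets is never read, so it is not carried along.

-- inner loop 'for j in range(0, k)': compare/swap adjacent positions j, j+1; snd = swapped
def bubblePass : Nat → List Char → List Char × Bool
  | 0, l => (l, false)
  | _ + 1, [] => ([], false)
  | _ + 1, [a] => ([a], false)
  | k + 1, a :: b :: rest =>
      if b < a then            -- list_of_name[j] > list_of_name[j+1]
        let r := bubblePass k (a :: rest)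
        (b :: r.1, true)
      else
        let r := bubblePass k (b :: rest)
        (a :: r.1, r.2)

-- outer loop 'for i in range(size)' with the early break; fuel f = size - i,
-- so the inner bound size-i-1 is f-1
def bubbleLoop : Nat → List Char → List Char
  | 0, l => l
  | f + 1, l =>
      let p := bubblePass f l
      if p.2 then bubbleLoop f p.1 else p.1

-- helper dubplicate_checker: keep first occurrences (visited accumulator, appended at the end)
def dupGo : List Char → List Char → List Char
  | visited, [] => visited
  | visited, x :: rest =>
      if x ∈ visited then dupGo visited rest else dupGo (visited ++ [x]) rest

def dubplicate_checker (list_of_name : List Char) : List Char :=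
  dupGo [] list_of_name

def bubble_sorting_alphabets (name : String) : List String :=
  let list_of_name := name.toList
  let size := list_of_name.length
  (dubplicate_checker (bubbleLoop size list_of_name)).map (fun c => String.ofList [c])

-- ===== PORT B =====
-- Source B: return sorted(set(name))
def bubble_sorting_alphabets_alt (name : String) : List String :=
  (PySem.List.sorted (PySem.Set.ofList name.toList) (fun c => c) false).map
    (fun c => String.ofList [c])

-- ===== PRECONDITION & SPEC =====
def Spec_bubble_sorting_alphabets (name : String) (out : List String) : Prop := out = bubble_sorting_alphabets_alt name
instance (name : String) (out : List String) : Decidable (Spec_bubble_sorting_alphabets name out) := by unfold Spec_bubble_sorting_alphabets; infer_instance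

-- ===== CLAIM (what is proved, stated in full; the proofs are below) =====
def Claim_equal_bubble_sorting_alphabets : Prop := ∀ (name : String), Dom_bubble_sorting_alphabets name → Spec_bubble_sorting_alphabets name (bubble_sorting_alphabets name)

-- ===== LEMMAS AND PROOFS =====

-- unfolding equation for the cons-cons case (the 'let' written out)
theorem bubblePass_succ_cons (k : Nat) (a b : Char) (rest : List Char) :
    bubblePass (k + 1) (a :: b :: rest) =
      if b < a then (b :: (bubblePass k (a :: rest)).1, true)
      else (a :: (bubblePass k (b :: rest)).1, (bubblePass k (b :: rest)).2) := by
  rw [bubblePass]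

-- ---- bubblePass facts ----

theorem bubblePass_perm (f : Nat) (l : List Char) : (bubblePass f l).1.Perm l := by
  induction f generalizing l with
  | zero => simp [bubblePass]
  | succ k ih =>
    match l with
    | [] => simp [bubblePass]
    | [a] => simp [bubblePass]
    | a :: b :: rest =>
      rw [bubblePass_succ_cons]
      split
      · exact ((ih (a :: rest)).cons b).trans (List.Perm.swap a b rest)
      · exact (ih (b :: rest)).cons a

theorem bubblePass_drop (f : Nat) (l : List Char) :
    (bubblePass f l).1.drop (f + 1) = l.drop (f + 1) := by
  induction f generalizing l with
  | zero =>
    match l with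
    | [] => simp [bubblePass]
    | [a] => simp [bubblePass]
    | a :: b :: rest => simp [bubblePass]
  | succ k ih =>
    match l with
    | [] => simp [bubblePass]
    | [a] => simp [bubblePass]
    | a :: b :: rest =>
      rw [bubblePass_succ_cons]
      split
      · simpa using ih (a :: rest)
      · simpa using ih (b :: rest)

theorem bubblePass_take_perm (f : Nat) (l : List Char) :
    ((bubblePass f l).1.take (f + 1)).Perm (l.take (f + 1)) := by
  have hperm := bubblePass_perm f l
  have hdrop := bubblePass_drop f l
  have h1 : (bubblePass f l).1.take (f + 1) ++ (bubblePass f l).1.drop (f + 1)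
      = (bubblePass f l).1 := List.take_append_drop _ _
  have h2 : l.take (f + 1) ++ l.drop (f + 1) = l := List.take_append_drop _ _
  have key : (bubblePass f l).1.take (f + 1) ++ l.drop (f + 1) = (bubblePass f l).1 := by
    rw [← hdrop]; exact h1
  have hstep : ((bubblePass f l).1.take (f + 1) ++ l.drop (f + 1)).Perm
      (l.take (f + 1) ++ l.drop (f + 1)) := by
    rw [key, h2]; exact hperm
  exact (List.perm_append_right_iff _).mp hstep

theorem bubblePass_max (f : Nat) (l : List Char) :
    ∀ m, (bubblePass f l).1[f]? = some m →
      ∀ x ∈ (bubblePass f l).1.take (f + 1), x ≤ m := by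
  induction f generalizing l with
  | zero =>
    intro m hm x hx
    have hl : (bubblePass 0 l).1 = l := rfl
    rw [hl] at hm hx
    match l with
    | [] => simp at hm
    | y :: t =>
      simp at hm hx
      exact le_of_eq (hx.trans hm)
  | succ k ih =>
    intro m hm x hx
    match l with
    | [] => simp [bubblePass] at hm
    | [a] => simp [bubblePass] at hm
    | a :: b :: rest =>
      rw [bubblePass_succ_cons] at hm hx
      split at hm
      · next hba =>
        rw [if_pos hba] at hx
        simp at hm hx
        rcases hx with hxb | hx
        · -- x = b : b < a ≤ m since a is in the recursive prefix
          have ha : a ∈ (bubblePass k (a :: rest)).1.take (k + 1) := by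
            have : a ∈ (a :: rest).take (k + 1) := by simp
            exact (bubblePass_take_perm k (a :: rest)).mem_iff.mpr this
          have := ih (a :: rest) m hm a ha
          exact hxb ▸ le_of_lt (lt_of_lt_of_le hba this)
        · exact ih (a :: rest) m hm x hx
      · next hba =>
        rw [if_neg hba] at hx
        simp at hm hx
        rcases hx with hxa | hx
        · have hb : b ∈ (bubblePass k (b :: rest)).1.take (k + 1) := by
            have : b ∈ (b :: rest).take (k + 1) := by simp
            exact (bubblePass_take_perm k (b :: rest)).mem_iff.mpr this
          have := ih (b :: rest) m hm b hb
          exact hxa ▸ le_trans (le_of_not_gt hba) this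
        · exact ih (b :: rest) m hm x hx

theorem bubblePass_noswap (f : Nat) (l : List Char) :
    (bubblePass f l).2 = false →
      (bubblePass f l).1 = l ∧ (l.take (f + 1)).Pairwise (· ≤ ·) := by
  induction f generalizing l with
  | zero =>
    intro _
    match l with
    | [] => simp [bubblePass]
    | [a] => simp [bubblePass]
    | a :: b :: rest => simp [bubblePass]
  | succ k ih =>
    intro hsw
    match l with
    | [] => simp [bubblePass]
    | [a] => simp [bubblePass]
    | a :: b :: rest =>
      rw [bubblePass_succ_cons] at hsw ⊢
      split at hsw
      · exact Bool.noConfusion hsw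
      · next hba =>
        simp at hsw
        obtain ⟨heq, hpw⟩ := ih (b :: rest) hsw
        rw [if_neg hba, heq]
        refine ⟨rfl, ?_⟩
        have hab : a ≤ b := le_of_not_gt hba
        simp only [List.take_succ_cons, List.pairwise_cons] at hpw ⊢
        constructor
        · intro y hy
          rcases List.mem_cons.mp hy with rfl | hy'
          · exact hab
          · exact le_trans hab (hpw.1 y hy')
        · exact hpw

-- ---- outer loop ----

def BubbleInv (f : Nat) (l : List Char) : Prop :=
  (l.drop f).Pairwise (· ≤ ·) ∧ ∀ x ∈ l.take f, ∀ y ∈ l.drop f, x ≤ y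

theorem bubbleLoop_spec (f : Nat) (l : List Char) (h : BubbleInv f l) :
    (bubbleLoop f l).Perm l ∧ (bubbleLoop f l).Pairwise (· ≤ ·) := by
  induction f generalizing l with
  | zero =>
    refine ⟨by simp [bubbleLoop], ?_⟩
    simpa [bubbleLoop] using h.1
  | succ k ih =>
    obtain ⟨hdrop_pw, hdom⟩ := h
    set l' := (bubblePass k l).1 with hl'
    have hperm : l'.Perm l := bubblePass_perm k l
    have hdropeq : l'.drop (k + 1) = l.drop (k + 1) := bubblePass_drop k l
    have htake : (l'.take (k + 1)).Perm (l.take (k + 1)) := bubblePass_take_perm k l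
    -- BubbleInv k l'
    have hinv : BubbleInv k l' := by
      constructor
      · -- drop k l' pairwise
        by_cases hk : k < l'.length
        · have hcons : l'.drop k = l'[k] :: l'.drop (k + 1) :=
            List.drop_eq_getElem_cons hk
          rw [hcons, hdropeq, List.pairwise_cons]
          constructor
          · intro y hy
            have hklen : k < (l'.take (k + 1)).length := by
              simp; omega
            have hmem' : l'[k] ∈ l'.take (k + 1) := by
              have hgt : (l'.take (k + 1))[k]'hklen = l'[k] := by
                simp [List.getElem_take]
              exact hgt ▸ List.getElem_mem hklen
            have hmem : l'[k] ∈ l.take (k + 1) := htake.mem_iff.mp hmem'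
            exact hdom _ hmem y hy
          · exact hdrop_pw
        · have : l'.drop k = [] := by
            apply List.drop_eq_nil_of_le; omega
          simp [this]
      · intro x hx y hy
        by_cases hk : k < l'.length
        · have hcons : l'.drop k = l'[k] :: l'.drop (k + 1) :=
            List.drop_eq_getElem_cons hk
          rw [hcons, hdropeq] at hy
          have hx' : x ∈ l'.take (k + 1) := by
            rw [List.take_add_one]
            exact List.mem_append_left _ hx
          rcases List.mem_cons.mp hy with hym | hy'
          · subst hym
            exact bubblePass_max k l _ (List.getElem?_eq_getElem hk) x hx'
          · exact hdom x (htake.mem_iff.mp hx') y hy'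
        · have : l'.drop k = [] := by
            apply List.drop_eq_nil_of_le; omega
          rw [this] at hy
          simp at hy
    show (if (bubblePass k l).2 then bubbleLoop k l' else l').Perm l ∧
      (if (bubblePass k l).2 then bubbleLoop k l' else l').Pairwise (· ≤ ·)
    by_cases hsw : (bubblePass k l).2 = true
    · rw [if_pos hsw]
      obtain ⟨p, s⟩ := ih l' hinv
      exact ⟨p.trans hperm, s⟩
    · rw [if_neg hsw]
      obtain ⟨heq, hpw⟩ := bubblePass_noswap k l (by simpa using hsw)
      rw [hl', heq]
      refine ⟨List.Perm.refl l, ?_⟩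
      have hsplit : l.take (k + 1) ++ l.drop (k + 1) = l := List.take_append_drop _ _
      rw [← hsplit, List.pairwise_append]
      exact ⟨hpw, hdrop_pw, fun x hx y hy => hdom x hx y hy⟩

theorem bubbleLoop_sorted (l : List Char) :
    (bubbleLoop l.length l).Perm l ∧ (bubbleLoop l.length l).Pairwise (· ≤ ·) := by
  apply bubbleLoop_spec
  constructor
  · simp
  · intro x _ y hy
    simp at hy

-- ---- dedup helper ----

theorem dupGo_mem (l vis : List Char) (x : Char) :
    x ∈ dupGo vis l ↔ x ∈ vis ∨ x ∈ l := by
  induction l generalizing vis with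
  | nil => simp [dupGo]
  | cons a t ih =>
    simp only [dupGo]
    split
    · next h =>
      rw [ih, List.mem_cons]
      constructor
      · rintro (hv | ht)
        · exact Or.inl hv
        · exact Or.inr (Or.inr ht)
      · rintro (hv | rfl | ht)
        · exact Or.inl hv
        · exact Or.inl h
        · exact Or.inr ht
    · rw [ih]
      simp [List.mem_append, List.mem_cons, or_assoc]

theorem dupGo_nodup (l vis : List Char) (h : vis.Nodup) : (dupGo vis l).Nodup := by
  induction l generalizing vis with
  | nil => simpa [dupGo]
  | cons a t ih =>
    simp only [dupGo]
    split
    · exact ih vis h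
    · next hna =>
      apply ih
      rw [List.nodup_append]
      refine ⟨h, List.nodup_singleton a, ?_⟩
      intro y hy b hb
      have hba : b = a := by simpa using hb
      subst hba
      intro he
      exact hna (he ▸ hy)

theorem dupGo_pairwise (l vis : List Char) (h : (vis ++ l).Pairwise (· ≤ ·)) :
    (dupGo vis l).Pairwise (· ≤ ·) := by
  induction l generalizing vis with
  | nil => simpa [dupGo] using h
  | cons a t ih =>
    simp only [dupGo]
    split
    · apply ih
      exact List.Pairwise.sublist ((List.sublist_cons_self a t).append_left vis) h
    · apply ih
      rw [List.append_assoc, List.singleton_append]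
      exact h

-- ---- assembly ----

theorem char_port_eq (cs : List Char) :
    dubplicate_checker (bubbleLoop cs.length cs)
      = PySem.List.sorted (PySem.Set.ofList cs) (fun c => c) false := by
  obtain ⟨hperm, hpw⟩ := bubbleLoop_sorted cs
  set S := bubbleLoop cs.length cs with hS
  set D := dubplicate_checker S with hD
  have hDpw : D.Pairwise (· ≤ ·) := dupGo_pairwise S [] (by simpa using hpw)
  have hDnd : D.Nodup := dupGo_nodup S [] (by simp)
  have hDmem : ∀ x, x ∈ D ↔ x ∈ cs := by
    intro x
    rw [hD, dubplicate_checker, dupGo_mem]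
    simp [hperm.mem_iff]
  have hDlt : D.Pairwise (· < ·) := by
    have := List.Pairwise.and hDpw hDnd
    exact this.imp (fun h => lt_of_le_of_ne h.1 h.2)
  have hSetmem : ∀ x, x ∈ PySem.Set.ofList cs ↔ x ∈ cs := fun x => PySem.Set.mem_ofList cs x
  have hSetnd : (PySem.Set.ofList cs).Nodup := PySem.Set.nodup_ofList cs
  have hP : D.Perm (PySem.Set.ofList cs) := by
    apply List.Subperm.antisymm
    · exact List.subperm_of_subset hDnd (fun x hx => (hSetmem x).mpr ((hDmem x).mp hx))
    · exact List.subperm_of_subset hSetnd (fun x hx => (hDmem x).mpr ((hSetmem x).mp hx))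
  exact (PySem.List.sorted_eq_of_perm_of_pairwise_lt _ _ _ hP hDlt).symm

-- ===== VERDICT (by name: the statement is the Claim_ definition above) =====
theorem bubble_sorting_alphabets_spec : Claim_equal_bubble_sorting_alphabets := by
  intro name _
  show _ = _
  simp only [bubble_sorting_alphabets, bubble_sorting_alphabets_alt]
  rw [char_port_eq]
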